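-- pv_equiv track=rewrite | github.com/Elcynia/Algorithm | BackTracking/별_찍기_11.py | func
-- ===== SOURCE A (Python) =====
-- def func(n):
--   if n == 3:
--     return ['  *  ', ' * * ', '*****']
--
--   stars = func(n // 2)
--   new = []
--   for star in stars:
--     new.append(' ' * (n // 2) + star + ' ' * (n // 2))
--   for star in stars:
--     new.append(star + ' ' + star)
--   return new
-- ===== SOURCE B (Python) =====
-- def func(n):
--     # collect the halving chain down to the 3-line base triangle
--     widths = []
--     while n > 3:
--         n //= 2
--         widths.append(n)
--     if n != 3:
--         raise ValueError('n must be of the form 3 * 2**k')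
--     # rebuild bottom-up
--     stars = ['  *  ', ' * * ', '*****']
--     for w in reversed(widths):
--         stars = [' ' * w + s + ' ' * w for s in stars] + [s + ' ' + s for s in stars]
--     return stars
-- ===== Notes on version B (the rewrite author's own statement) =====
-- stated objective: alternative
-- what changed: Replaces A's top-down recursion on n//2 with an iterative two-phase build: a while loop first collects the halving-chain widths, then a for loop over the reversed widths rebuilds the line list bottom-up from the 3-line base triangle.
import Mathlib
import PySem

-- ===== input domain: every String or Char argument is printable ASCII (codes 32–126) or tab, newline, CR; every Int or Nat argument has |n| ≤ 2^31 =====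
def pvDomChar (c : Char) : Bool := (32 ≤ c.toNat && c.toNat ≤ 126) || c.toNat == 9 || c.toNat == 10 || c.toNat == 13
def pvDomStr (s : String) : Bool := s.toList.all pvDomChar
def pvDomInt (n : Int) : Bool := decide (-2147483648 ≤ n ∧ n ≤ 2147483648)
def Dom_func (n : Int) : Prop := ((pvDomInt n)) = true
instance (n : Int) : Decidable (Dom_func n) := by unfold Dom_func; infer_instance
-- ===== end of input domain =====

-- B replaces A's top-down recursion with an iterative two-phase build: collect the
-- halving chain, then rebuild the line list bottom-up over it (objective: alternative).
-- Pre_ excludes exactly the inputs on which Python A never reaches its base case and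
-- raises RecursionError (all n not of the form 3·2^k); B raises ValueError there.

-- shared helper: Python's ' ' * m (exact: negative m gives the empty string)
def pvSp (m : Int) : String := String.ofList (List.replicate m.toNat ' ')

def pvBase : List String := ["  *  ", " * * ", "*****"]

-- ===== PORT A =====
-- fuel-guarded transliteration of A's recursion (n.natAbs + 1 levels is enough on every
-- input where Python A terminates; the fuel guard only makes the recursion total)
def funcAux : Nat → Int → List String
  | 0, _ => []
  | f + 1, n =>
    if n = 3 then pvBase
    else
      let stars := funcAux f (PySem.Int.floordiv n 2)
      let new := stars.foldl
        (fun acc star => acc ++ [pvSp (PySem.Int.floordiv n 2) ++ star ++ pvSp (PySem.Int.floordiv n 2)]) []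
      stars.foldl (fun acc star => acc ++ [star ++ " " ++ star]) new

def func (n : Int) : List String := funcAux (n.natAbs + 1) n

-- ===== PORT B =====
-- phase 1 of B: the while loop; returns (widths, final value of n). Fuel-guarded;
-- n.natAbs + 1 iterations always suffice since n at least halves each round.
def loopAux : Nat → Int → List Int × Int
  | 0, n => ([], n)
  | f + 1, n =>
    if 3 < n then
      (PySem.Int.floordiv n 2 :: (loopAux f (PySem.Int.floordiv n 2)).1,
       (loopAux f (PySem.Int.floordiv n 2)).2)
    else ([], n)

-- one body of B's for-loop (the two list comprehensions)
def pvStep (w : Int) (stars : List String) : List String :=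
  (stars.map fun s => pvSp w ++ s ++ pvSp w) ++ (stars.map fun s => s ++ " " ++ s)

def func_alt (n : Int) : List String :=
  let r := loopAux (n.natAbs + 1) n
  if r.2 = 3 then r.1.reverse.foldl (fun stars w => pvStep w stars) pvBase
  else []  -- Python B raises ValueError here; these inputs are outside Pre_

-- ===== PRECONDITION & SPEC =====
-- Pre_: exactly the inputs on which Python A returns, i.e. the floor-halving chain from
-- n reaches 3: 3·2^k ≤ n < 4·2^k for some k. The bound k ≤ Nat.log2 n.natAbs is
-- implied by 3·2^k ≤ n (then 2^k ≤ n.natAbs), so it restricts nothing; it only makes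
-- Pre_ quickly decidable. On every other n, A recurses forever and raises RecursionError.
def Pre_func (n : Int) : Prop := ∃ k, k ≤ Nat.log2 n.natAbs ∧ 3 * 2 ^ k ≤ n ∧ n < 4 * 2 ^ k
instance (n : Int) : Decidable (Pre_func n) := by unfold Pre_func; infer_instance

def pvWitness_func : Int := 7

def Spec_func (n : Int) (out : List String) : Prop := out = func_alt n
instance (n : Int) (out : List String) : Decidable (Spec_func n out) := by unfold Spec_func; infer_instance

-- ===== CLAIM (what is proved, stated in full; the proofs are below) =====
def Claim_equal_func : Prop := ∀ (n : Int), Dom_func n → Pre_func n → Spec_func n (func n)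

-- ===== LEMMAS AND PROOFS =====

theorem foldl_app (f : String → String) (l init : List String) :
    l.foldl (fun acc x => acc ++ [f x]) init = init ++ l.map f := by
  induction l generalizing init with
  | nil => simp
  | cons a t ih => simp [List.foldl, ih]

-- A's body at n ≠ 3 is one pvStep around the recursive call
theorem funcAux_step (f : Nat) (n : Int) (h : ¬ n = 3) :
    funcAux (f + 1) n = pvStep (PySem.Int.floordiv n 2) (funcAux f (PySem.Int.floordiv n 2)) := by
  simp only [funcAux, if_neg h, foldl_app, pvStep, List.nil_append]

theorem halve_bounds (k : Nat) (n : Int) (h1 : 3 * 2 ^ (k + 1) ≤ n) (h2 : n < 4 * 2 ^ (k + 1)) :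
    3 * 2 ^ k ≤ PySem.Int.floordiv n 2 ∧ PySem.Int.floordiv n 2 < 4 * 2 ^ k := by
  constructor
  · rw [PySem.Int.le_floordiv_iff_mul_le (by norm_num)]
    calc 3 * 2 ^ k * 2 = 3 * 2 ^ (k + 1) := by ring
      _ ≤ n := h1
  · rw [PySem.Int.floordiv_lt_iff_lt_mul (by norm_num)]
    calc n < 4 * 2 ^ (k + 1) := h2
      _ = 4 * 2 ^ k * 2 := by ring

-- both ports compute the same value when the chain from n reaches 3 in k steps
theorem main_eq (k : Nat) :
    ∀ (n : Int) (f g : Nat), k ≤ f → k ≤ g → 3 * 2 ^ k ≤ n → n < 4 * 2 ^ k →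
      funcAux (f + 1) n =
        (loopAux (g + 1) n).1.reverse.foldl (fun stars w => pvStep w stars) pvBase
        ∧ (loopAux (g + 1) n).2 = 3 := by
  induction k with
  | zero =>
    intro n f g _ _ h1 h2
    have hn : n = 3 := by omega
    subst hn
    simp [funcAux, loopAux]
  | succ k ih =>
    intro n f g hf hg h1 h2
    obtain ⟨f', rfl⟩ : ∃ f', f = f' + 1 := ⟨f - 1, by omega⟩
    obtain ⟨g', rfl⟩ : ∃ g', g = g' + 1 := ⟨g - 1, by omega⟩
    have hpow : (1 : Int) ≤ 2 ^ k := one_le_pow₀ (by norm_num)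
    have hne : ¬ n = 3 := by
      have : (2 : Int) ^ (k + 1) = 2 * 2 ^ k := by ring
      nlinarith
    have hlt : 3 < n := by
      have : (2 : Int) ^ (k + 1) = 2 * 2 ^ k := by ring
      nlinarith
    obtain ⟨hm1, hm2⟩ := halve_bounds k n h1 h2
    obtain ⟨ihw, ihf⟩ := ih (PySem.Int.floordiv n 2) f' g' (by omega) (by omega) hm1 hm2
    have hL1 : (loopAux (g' + 1 + 1) n).1
        = PySem.Int.floordiv n 2 :: (loopAux (g' + 1) (PySem.Int.floordiv n 2)).1 := by
      simp [loopAux, hlt]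
    have hL2 : (loopAux (g' + 1 + 1) n).2
        = (loopAux (g' + 1) (PySem.Int.floordiv n 2)).2 := by
      simp [loopAux, hlt]
    refine ⟨?_, by rw [hL2]; exact ihf⟩
    rw [funcAux_step (f' + 1) n hne, hL1, List.reverse_cons, List.foldl_append, ihw]
    rfl

theorem k_le_natAbs (k : Nat) (n : Int) (h1 : 3 * 2 ^ k ≤ n) : k ≤ n.natAbs := by
  have hk : (k : Int) < 2 ^ k := by
    have := Nat.lt_two_pow_self (n := k)
    exact_mod_cast this
  have hpow : (0 : Int) ≤ 2 ^ k := by positivity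
  have : (k : Int) ≤ n := by nlinarith
  omega

-- ===== VERDICT (by name: the statement is the Claim_ definition above) =====
theorem func_spec : Claim_equal_func := by
  intro n _ hpre
  obtain ⟨k, _, h1, h2⟩ := hpre
  have hk := k_le_natAbs k n h1
  obtain ⟨hw, hf⟩ := main_eq k n n.natAbs n.natAbs hk hk h1 h2
  unfold Spec_func func func_alt
  simp only [hf, if_pos]
  exact hw
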